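-- pv_equiv track=rewrite | github.com/xBalbinus/bccs1 | HW8/hw8_p4.py | extendedDict
-- ===== SOURCE A (Python) =====
-- def extendedDict(a,d):
--     #Create new dict
--     extendeddict = {}
--     #Set actors (first name, last name) as keys
--     for actor in a.keys():
--         extendeddict.setdefault(actor, [])
--     #Create mapping (values) from movie to all actors in each movie
--     #Iterate through all movie names per actor
--     for key in extendeddict.keys():
--         for movie in d.keys():
--             if key in d[movie]:
--                 for collaborator in d[movie]:
--                     if collaborator not in extendeddict[key] and collaborator != key:
--                         extendeddict[key].append(collaborator)
--     return extendeddict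
-- ===== SOURCE B (Python) =====
-- def extendedDict(a, d):
--     # Two staged passes instead of A's per-actor rescans of all movies:
--     # Stage 1: one pass over the movies builds an inverted index mapping each
--     # actor key to the raw concatenation of the casts of the movies they are in.
--     flat = {actor: [] for actor in a}
--     for cast in d.values():
--         for actor in dict.fromkeys(cast):
--             if actor in flat:
--                 flat[actor] += cast
--     # Stage 2: each answer is one order-preserving dedup (dict.fromkeys) of the
--     # concatenation, minus the actor themself.
--     return {actor: [c for c in dict.fromkeys(conc) if c != actor]
--             for actor, conc in flat.items()}
-- ===== Notes on version B (the rewrite author's own statement) =====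
-- stated objective: faster
-- what changed: B replaces A's per-actor scan of all movies with incremental not-in-list dedup by two staged passes: one pass over the movies builds an inverted index actor -> raw concatenation of casts containing the actor, then each answer is produced wholesale by a single order-preserving dict.fromkeys dedup with the actor filtered out.
import Mathlib
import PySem

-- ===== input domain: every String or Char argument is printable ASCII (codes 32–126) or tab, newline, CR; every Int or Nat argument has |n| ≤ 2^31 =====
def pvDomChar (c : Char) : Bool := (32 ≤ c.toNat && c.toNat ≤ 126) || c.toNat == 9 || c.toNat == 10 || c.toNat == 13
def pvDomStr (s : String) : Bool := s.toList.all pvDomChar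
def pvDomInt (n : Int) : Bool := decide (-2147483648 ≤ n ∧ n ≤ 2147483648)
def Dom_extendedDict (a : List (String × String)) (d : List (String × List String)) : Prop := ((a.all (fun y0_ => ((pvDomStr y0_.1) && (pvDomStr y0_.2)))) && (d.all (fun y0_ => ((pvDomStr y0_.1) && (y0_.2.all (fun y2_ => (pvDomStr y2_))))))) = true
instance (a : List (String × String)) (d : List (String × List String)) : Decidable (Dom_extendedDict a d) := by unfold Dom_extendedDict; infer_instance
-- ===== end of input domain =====

-- B replaces A's per-actor movie scans with incremental dedup by two staged passes:
-- an inverted index actor -> concatenation of casts, then one wholesale ordered dedup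
-- per actor (objective: faster).

-- ===== PORT A =====
-- inner 'for collaborator in d[movie]' body of A
def innerCollabA (key : String) (e : PySem.Dict String (List String)) (collaborator : String) :
    PySem.Dict String (List String) :=
  if ¬ (e.getD key []).contains collaborator ∧ collaborator ≠ key then
    e.insert key (e.getD key [] ++ [collaborator])
  else e

-- 'for movie in d.keys()' body of A, for one key
def movieLoopA (dd : PySem.Dict String (List String)) (e : PySem.Dict String (List String))
    (key : String) : PySem.Dict String (List String) :=
  dd.keys.foldl (fun e movie =>
    if (dd.getD movie []).contains key then (dd.getD movie []).foldl (innerCollabA key) e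
    else e) e

def extendedDict (a : List (String × String)) (d : List (String × List String)) :
    List (String × List String) :=
  let da := PySem.Dict.ofList a
  let dd := PySem.Dict.ofList d
  let ed0 := da.keys.foldl (fun (e : PySem.Dict String (List String)) actor => e.setdefault actor [])
    PySem.Dict.empty
  (ed0.keys.foldl (movieLoopA dd) ed0).items

-- ===== PORT B =====
-- inner 'for actor in dict.fromkeys(cast)' body of B's stage 1
def addCastB (cast : List String) (r : PySem.Dict String (List String)) (actor : String) :
    PySem.Dict String (List String) :=
  if r.contains actor then r.insert actor (r.getD actor [] ++ cast) else r

-- 'for cast in d.values()' body of B's stage 1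
def movieStepB (r : PySem.Dict String (List String)) (cast : List String) :
    PySem.Dict String (List String) :=
  (PySem.List.dedup cast).foldl (addCastB cast) r

def extendedDict_alt (a : List (String × String)) (d : List (String × List String)) :
    List (String × List String) :=
  let flat0 := (PySem.Dict.ofList a).keys.foldl
    (fun (r : PySem.Dict String (List String)) actor => r.insert actor []) PySem.Dict.empty
  let flat := (PySem.Dict.ofList d).values.foldl movieStepB flat0
  flat.items.map (fun p => (p.1, (PySem.List.dedup p.2).filter (fun c => c != p.1)))

-- ===== PRECONDITION & SPEC =====
def Spec_extendedDict (a : List (String × String)) (d : List (String × List String)) (out : List (String × List String)) : Prop := out = extendedDict_alt a d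
instance (a : List (String × String)) (d : List (String × List String)) (out : List (String × List String)) : Decidable (Spec_extendedDict a d out) := by unfold Spec_extendedDict; infer_instance

-- ===== CLAIM (what is proved, stated in full; the proofs are below) =====
def Claim_equal_extendedDict : Prop := ∀ (a : List (String × String)) (d : List (String × List String)), Dom_extendedDict a d → Spec_extendedDict a d (extendedDict a d)

-- ===== LEMMAS AND PROOFS =====

-- pure list-level abstractions of A's loops
def stepL (k : String) (l : List String) (c : String) : List String :=
  if ¬ l.contains c ∧ c ≠ k then l ++ [c] else l

def movL (k : String) (l : List String) (cast : List String) : List String :=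
  if cast.contains k then cast.foldl (stepL k) l else l

-- pure abstraction of B's stage-1 per-movie step for one key
def flatStep (k : String) (l : List String) (cast : List String) : List String :=
  if cast.contains k then l ++ cast else l

-- recursive ordered dedup relative to a seen-list, with k excluded
def dedK (k : String) (seen : List String) : List String → List String
  | [] => []
  | c :: M => if c ∈ seen ∨ c = k then dedK k seen M else c :: dedK k (seen ++ [c]) M

-- ---- one-step facts about A's innermost body ----
theorem innerA_get?_ne (k x c : String) (hx : x ≠ k) (e : PySem.Dict String (List String)) :
    (innerCollabA k e c).get? x = e.get? x := by
  unfold innerCollabA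
  split
  · exact PySem.Dict.get?_insert_of_ne _ _ hx
  · rfl

theorem innerA_get?_self (k c : String) (e : PySem.Dict String (List String)) (cur : List String)
    (h : e.get? k = some cur) :
    (innerCollabA k e c).get? k = some (stepL k cur c) := by
  have hg : e.getD k [] = cur := PySem.Dict.getD_of_get?_eq_some _ _ h
  unfold innerCollabA stepL
  rw [hg]
  split
  · exact PySem.Dict.get?_insert_self _ _ _
  · exact h

theorem innerA_keys (k c : String) (e : PySem.Dict String (List String))
    (h : e.contains k = true) : (innerCollabA k e c).keys = e.keys := by
  unfold innerCollabA
  split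
  · exact PySem.Dict.keys_insert_of_contains _ _ h
  · rfl

-- ---- A's cast loop ----
theorem castA_frame (k x : String) (hx : x ≠ k) (cast : List String)
    (e : PySem.Dict String (List String)) :
    (cast.foldl (innerCollabA k) e).get? x = e.get? x := by
  induction cast generalizing e with
  | nil => rfl
  | cons c cs ih => rw [List.foldl_cons, ih, innerA_get?_ne k x c hx]

theorem castA_value (k : String) (cast : List String) (e : PySem.Dict String (List String))
    (cur : List String) (h : e.get? k = some cur) :
    (cast.foldl (innerCollabA k) e).get? k = some (cast.foldl (stepL k) cur) := by
  induction cast generalizing e cur with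
  | nil => simpa using h
  | cons c cs ih =>
    rw [List.foldl_cons]
    exact ih _ _ (innerA_get?_self k c e cur h)

theorem castA_keys (k : String) (cast : List String) (e : PySem.Dict String (List String))
    (h : e.contains k = true) :
    (cast.foldl (innerCollabA k) e).keys = e.keys := by
  induction cast generalizing e with
  | nil => rfl
  | cons c cs ih =>
    rw [List.foldl_cons, ih _ (by
      rw [PySem.Dict.contains_iff_mem_keys, innerA_keys k c e h,
        ← PySem.Dict.contains_iff_mem_keys]; exact h), innerA_keys k c e h]

-- ---- A's movie loop ----
theorem movA_frame (dd : PySem.Dict String (List String)) (k x : String) (hx : x ≠ k)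
    (e : PySem.Dict String (List String)) :
    (movieLoopA dd e k).get? x = e.get? x := by
  unfold movieLoopA
  induction dd.keys generalizing e with
  | nil => rfl
  | cons m ms ih =>
    rw [List.foldl_cons, ih]
    split
    · exact castA_frame k x hx _ e
    · rfl

theorem movA_value (dd : PySem.Dict String (List String)) (k : String)
    (e : PySem.Dict String (List String)) (cur : List String) (h : e.get? k = some cur) :
    (movieLoopA dd e k).get? k =
      some (dd.keys.foldl (fun l m => movL k l (dd.getD m [])) cur) := by
  unfold movieLoopA
  induction dd.keys generalizing e cur with
  | nil => simpa using h
  | cons m ms ih =>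
    simp only [List.foldl_cons]
    unfold movL
    split
    · exact ih _ _ (castA_value k _ e cur h)
    · exact ih _ _ h

theorem movA_keys (dd : PySem.Dict String (List String)) (k : String)
    (e : PySem.Dict String (List String)) (h : e.contains k = true) :
    (movieLoopA dd e k).keys = e.keys := by
  unfold movieLoopA
  induction dd.keys generalizing e with
  | nil => rfl
  | cons m ms ih =>
    simp only [List.foldl_cons]
    split
    · rw [ih _ (by
        rw [PySem.Dict.contains_iff_mem_keys, castA_keys k _ e h,
          ← PySem.Dict.contains_iff_mem_keys]; exact h),
        castA_keys k _ e h]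
    · exact ih _ h

-- ---- A's outer key loop ----
theorem outerA (dd : PySem.Dict String (List String)) (ks : List String)
    (e : PySem.Dict String (List String)) (hnd : ks.Nodup)
    (hsub : ∀ k ∈ ks, e.contains k = true) :
    (ks.foldl (movieLoopA dd) e).keys = e.keys ∧
    ∀ x cur, e.get? x = some cur →
      (ks.foldl (movieLoopA dd) e).get? x =
        some (if x ∈ ks then dd.keys.foldl (fun l m => movL x l (dd.getD m [])) cur else cur) := by
  induction ks generalizing e with
  | nil => exact ⟨rfl, fun x cur h => by simpa using h⟩
  | cons k ks ih =>
    have hk : e.contains k = true := hsub k (by simp)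
    have hkeys : (movieLoopA dd e k).keys = e.keys := movA_keys dd k e hk
    have hsub' : ∀ j ∈ ks, (movieLoopA dd e k).contains j = true := by
      intro j hj
      rw [PySem.Dict.contains_iff_mem_keys, hkeys, ← PySem.Dict.contains_iff_mem_keys]
      exact hsub j (by simp [hj])
    obtain ⟨ihk, ihv⟩ := ih (movieLoopA dd e k) hnd.of_cons hsub'
    refine ⟨by rw [List.foldl_cons, ihk, hkeys], ?_⟩
    intro x cur h
    rw [List.foldl_cons]
    by_cases hxk : x = k
    · subst hxk
      rw [ihv x _ (movA_value dd x e cur h)]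
      have hnotin : x ∉ ks := by simpa using hnd.notMem
      simp [hnotin]
    · rw [ihv x cur (by rw [movA_frame dd k x hxk e]; exact h)]
      simp [hxk]

-- ---- B's stage 1 ----
theorem addB_get?_ne (cast : List String) (x actor : String) (hx : x ≠ actor)
    (r : PySem.Dict String (List String)) :
    (addCastB cast r actor).get? x = r.get? x := by
  unfold addCastB
  split
  · exact PySem.Dict.get?_insert_of_ne _ _ hx
  · rfl

theorem addB_get?_self (cast : List String) (actor : String)
    (r : PySem.Dict String (List String)) (cur : List String)
    (h : r.get? actor = some cur) :
    (addCastB cast r actor).get? actor = some (cur ++ cast) := by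
  have hc : r.contains actor = true := by
    rw [PySem.Dict.contains_eq_isSome_get?, h]; rfl
  unfold addCastB
  rw [if_pos hc, PySem.Dict.getD_of_get?_eq_some _ _ h]
  exact PySem.Dict.get?_insert_self _ _ _

theorem addB_keys (cast : List String) (actor : String)
    (r : PySem.Dict String (List String)) :
    (addCastB cast r actor).keys = r.keys := by
  unfold addCastB
  split
  · exact PySem.Dict.keys_insert_of_contains _ _ (by assumption)
  · rfl

-- the inner dedup-cast loop of stage 1
theorem castB (cast : List String) (as : List String) (hnd : as.Nodup)
    (r : PySem.Dict String (List String)) :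
    (as.foldl (addCastB cast) r).keys = r.keys ∧
    ∀ x cur, r.get? x = some cur →
      (as.foldl (addCastB cast) r).get? x = some (if x ∈ as then cur ++ cast else cur) := by
  induction as generalizing r with
  | nil => exact ⟨rfl, fun x cur h => by simpa using h⟩
  | cons a as ih =>
    obtain ⟨ihk, ihv⟩ := ih hnd.of_cons (addCastB cast r a)
    refine ⟨by rw [List.foldl_cons, ihk, addB_keys], ?_⟩
    intro x cur h
    rw [List.foldl_cons]
    by_cases hxa : x = a
    · subst hxa
      rw [ihv x _ (addB_get?_self cast x r cur h)]
      have hnotin : x ∉ as := by simpa using hnd.notMem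
      simp [hnotin]
    · rw [ihv x cur (by rw [addB_get?_ne cast x a hxa]; exact h)]
      simp [hxa]

-- the outer movie loop of stage 1
theorem valuesB (casts : List (List String)) (r : PySem.Dict String (List String)) :
    (casts.foldl movieStepB r).keys = r.keys ∧
    ∀ x cur, r.get? x = some cur →
      (casts.foldl movieStepB r).get? x = some (casts.foldl (flatStep x) cur) := by
  induction casts generalizing r with
  | nil => exact ⟨rfl, fun x cur h => by simpa using h⟩
  | cons cast casts ih =>
    obtain ⟨mk, mv⟩ := castB cast (PySem.List.dedup cast) (PySem.List.nodup_dedup cast) r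
    obtain ⟨ihk, ihv⟩ := ih (movieStepB r cast)
    refine ⟨by rw [List.foldl_cons, ihk, movieStepB, mk], ?_⟩
    intro x cur h
    have hmem : (x ∈ PySem.List.dedup cast) ↔ cast.contains x = true := by
      rw [PySem.List.mem_dedup, List.contains_iff_mem]
    have hv : (movieStepB r cast).get? x = some (flatStep x cur cast) := by
      rw [movieStepB, mv x cur h]
      unfold flatStep
      by_cases hc : cast.contains x = true
      · rw [if_pos (hmem.mpr hc), if_pos hc]
      · rw [if_neg (fun h' => hc (hmem.mp h')), if_neg hc]
    rw [List.foldl_cons, ihv x _ hv]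
    rfl

-- ---- bridges between the pure loops ----
-- accumulator shift for flatStep
theorem flatStep_acc (k : String) (casts : List (List String)) (M : List String) :
    casts.foldl (flatStep k) M = M ++ casts.foldl (flatStep k) [] := by
  induction casts generalizing M with
  | nil => simp
  | cons c cs ih =>
    simp only [List.foldl_cons]
    rw [ih (flatStep k M c), ih (flatStep k [] c)]
    unfold flatStep
    split <;> simp

-- A's movie loop is the cast-element loop over the concatenation B builds
theorem movL_eq_flat (k : String) (casts : List (List String)) (l : List String) :
    casts.foldl (movL k) l = (casts.foldl (flatStep k) []).foldl (stepL k) l := by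
  induction casts generalizing l with
  | nil => rfl
  | cons c cs ih =>
    simp only [List.foldl_cons]
    rw [flatStep_acc k cs (flatStep k [] c)]
    by_cases hc : c.contains k = true
    · rw [show movL k l c = c.foldl (stepL k) l from by unfold movL; rw [if_pos hc],
        show flatStep k [] c = [] ++ c from by unfold flatStep; rw [if_pos hc],
        ih, List.nil_append, List.foldl_append]
    · rw [show movL k l c = l from by unfold movL; rw [if_neg hc],
        show flatStep k [] c = [] from by unfold flatStep; rw [if_neg hc],
        ih, List.nil_append]

-- A's element loop computes dedK
theorem stepL_eq_dedK (k : String) (M : List String) (l : List String) :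
    M.foldl (stepL k) l = l ++ dedK k l M := by
  induction M generalizing l with
  | nil => simp [dedK]
  | cons c M ih =>
    simp only [List.foldl_cons, dedK]
    by_cases hck : c = k
    · rw [if_pos (Or.inr hck)]
      have : stepL k l c = l := by unfold stepL; rw [if_neg (by simp [hck])]
      rw [this, ih]
    · by_cases hcl : c ∈ l
      · rw [if_pos (Or.inl hcl)]
        have : stepL k l c = l := by
          unfold stepL
          rw [if_neg (fun h => h.1 (List.contains_iff_mem.mpr hcl))]
        rw [this, ih]
      · rw [if_neg (by simp [hck, hcl])]
        have : stepL k l c = l ++ [c] := by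
          unfold stepL
          rw [if_pos ⟨fun h => hcl (List.contains_iff_mem.mp h), hck⟩]
        rw [this, ih]
        simp

-- B's wholesale Set.add-folding dedup (= PySem.List.dedup), filtered at k, computes dedK
theorem filter_dedK (k : String) (M : List String) (s t : List String)
    (h : ∀ x, x ≠ k → (x ∈ s ↔ x ∈ t)) :
    (M.foldl PySem.Set.add s).filter (fun c => c != k) =
      s.filter (fun c => c != k) ++ dedK k t M := by
  induction M generalizing s t with
  | nil => simp [dedK]
  | cons c M ih =>
    simp only [List.foldl_cons, dedK]
    by_cases hck : c = k
    · subst hck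
      rw [if_pos (Or.inr rfl)]
      by_cases hcs : c ∈ s
      · have : PySem.Set.add s c = s := by simp [PySem.Set.add, hcs]
        rw [this, ih s t h]
      · have : PySem.Set.add s c = s ++ [c] := by simp [PySem.Set.add, hcs]
        rw [this, ih (s ++ [c]) t (fun x hx => by
          simp only [List.mem_append, List.mem_singleton]
          constructor
          · rintro (h' | h')
            · exact (h x hx).mp h'
            · exact absurd h' hx
          · intro h'; exact Or.inl ((h x hx).mpr h'))]
        simp
    · by_cases hcs : c ∈ s
      · have hct : c ∈ t := (h c hck).mp hcs
        rw [if_pos (Or.inl hct)]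
        have : PySem.Set.add s c = s := by simp [PySem.Set.add, hcs]
        rw [this, ih s t h]
      · have hct : c ∉ t := fun h' => hcs ((h c hck).mpr h')
        rw [if_neg (by simp [hck, hct])]
        have : PySem.Set.add s c = s ++ [c] := by simp [PySem.Set.add, hcs]
        rw [this, ih (s ++ [c]) (t ++ [c]) (fun x hx => by simp [h x hx])]
        have hfc : (c != k) = true := by simp [hck]
        simp [List.filter_append, hfc]

-- initial dictionaries
theorem initInsert (ks : List String) (hnd : ks.Nodup) {ν : Type} (v : ν) :
    ((ks.foldl (fun (r : PySem.Dict String ν) a => r.insert a v) PySem.Dict.empty)).items =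
      ks.map (fun k => (k, v)) := by
  have := PySem.Dict.items_foldl_insert_fresh ks (fun x => x) (fun _ => v) PySem.Dict.empty
    (fun a _ => by simp [PySem.Dict.contains_empty]) (by simpa using hnd)
  simpa using this

theorem setdefaultFold_eq (ks : List String) (e : PySem.Dict String (List String))
    (hnd : ks.Nodup) (hfresh : ∀ k ∈ ks, e.contains k = false) :
    ks.foldl (fun (e : PySem.Dict String (List String)) a => e.setdefault a []) e =
      ks.foldl (fun (e : PySem.Dict String (List String)) a => e.insert a []) e := by
  induction ks generalizing e with
  | nil => rfl
  | cons k ks ih =>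
    simp only [List.foldl_cons]
    rw [PySem.Dict.setdefault_of_not_contains _ _ (hfresh k (by simp))]
    refine ih _ hnd.of_cons ?_
    intro j hj
    have hknotin : k ∉ ks := by simpa using hnd.notMem
    have hjk : j ≠ k := fun h => hknotin (h ▸ hj)
    rw [PySem.Dict.contains_insert]
    simp [hjk, hfresh j (by simp [hj])]

-- ---- characterizations of the two ports ----
theorem A_char (a : List (String × String)) (d : List (String × List String)) :
    extendedDict a d = (PySem.Dict.ofList a).keys.map (fun k =>
      (k, (PySem.Dict.ofList d).keys.foldl
        (fun l m => movL k l ((PySem.Dict.ofList d).getD m [])) [])) := by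
  unfold extendedDict
  dsimp only
  have hnd := PySem.Dict.nodup_keys_ofList a
  have hitems0 : ((PySem.Dict.ofList a).keys.foldl
      (fun (e : PySem.Dict String (List String)) actor => e.setdefault actor [])
      PySem.Dict.empty).items =
      (PySem.Dict.ofList a).keys.map (fun k => (k, ([] : List String))) := by
    rw [setdefaultFold_eq _ _ hnd (fun k _ => by simp [PySem.Dict.contains_empty]),
      initInsert _ hnd]
  have hkeys0 : ((PySem.Dict.ofList a).keys.foldl
      (fun (e : PySem.Dict String (List String)) actor => e.setdefault actor [])
      PySem.Dict.empty).keys = (PySem.Dict.ofList a).keys := by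
    have hrfl : ∀ (e : PySem.Dict String (List String)), e.keys = e.items.map Prod.fst :=
      fun e => rfl
    rw [hrfl, hitems0, List.map_map]
    exact List.map_id _ ▸ rfl
  have hnd0 : ((PySem.Dict.ofList a).keys.foldl
      (fun (e : PySem.Dict String (List String)) actor => e.setdefault actor [])
      PySem.Dict.empty).keys.Nodup := by rw [hkeys0]; exact hnd
  obtain ⟨hK, hV⟩ := outerA (PySem.Dict.ofList d) _ _ hnd0
    (fun k hk => (PySem.Dict.contains_iff_mem_keys _ _).mpr hk)
  have hndF : ((((PySem.Dict.ofList a).keys.foldl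
      (fun (e : PySem.Dict String (List String)) actor => e.setdefault actor [])
      PySem.Dict.empty)).keys.foldl (movieLoopA (PySem.Dict.ofList d))
      ((PySem.Dict.ofList a).keys.foldl
      (fun (e : PySem.Dict String (List String)) actor => e.setdefault actor [])
      PySem.Dict.empty)).keys.Nodup := by
    rw [hK]
    exact hnd0
  rw [PySem.Dict.items_eq_map_keys _ hndF ([] : List String), hK, hkeys0]
  apply List.map_congr_left
  intro k hk
  have hget0 : ((PySem.Dict.ofList a).keys.foldl
      (fun (e : PySem.Dict String (List String)) actor => e.setdefault actor [])
      PySem.Dict.empty).get? k = some [] := by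
    exact PySem.Dict.get?_of_mem_items _
      (by rw [hitems0]; exact List.mem_map_of_mem hk) hnd0
  have hv := hV k [] hget0
  rw [hkeys0] at hv
  rw [if_pos hk] at hv
  exact congrArg (Prod.mk k) (PySem.Dict.getD_of_get?_eq_some _ _ hv)

theorem B_char (a : List (String × String)) (d : List (String × List String)) :
    extendedDict_alt a d = (PySem.Dict.ofList a).keys.map (fun k =>
      (k, (PySem.List.dedup ((PySem.Dict.ofList d).values.foldl (flatStep k) [])).filter
        (fun c => c != k))) := by
  unfold extendedDict_alt
  dsimp only
  have hnd := PySem.Dict.nodup_keys_ofList a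
  have hitems0 : ((PySem.Dict.ofList a).keys.foldl
      (fun (r : PySem.Dict String (List String)) actor => r.insert actor [])
      PySem.Dict.empty).items =
      (PySem.Dict.ofList a).keys.map (fun k => (k, ([] : List String))) := initInsert _ hnd _
  have hkeys0 : ((PySem.Dict.ofList a).keys.foldl
      (fun (r : PySem.Dict String (List String)) actor => r.insert actor [])
      PySem.Dict.empty).keys = (PySem.Dict.ofList a).keys := by
    have hrfl : ∀ (e : PySem.Dict String (List String)), e.keys = e.items.map Prod.fst :=
      fun e => rfl
    rw [hrfl, hitems0, List.map_map]
    exact List.map_id _ ▸ rfl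
  have hnd0 : ((PySem.Dict.ofList a).keys.foldl
      (fun (r : PySem.Dict String (List String)) actor => r.insert actor [])
      PySem.Dict.empty).keys.Nodup := by rw [hkeys0]; exact hnd
  obtain ⟨hK, hV⟩ := valuesB (PySem.Dict.ofList d).values
    ((PySem.Dict.ofList a).keys.foldl
      (fun (r : PySem.Dict String (List String)) actor => r.insert actor [])
      PySem.Dict.empty)
  have hndF : (((PySem.Dict.ofList d).values.foldl movieStepB
      ((PySem.Dict.ofList a).keys.foldl
        (fun (r : PySem.Dict String (List String)) actor => r.insert actor [])
        PySem.Dict.empty)).keys).Nodup := by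
    rw [hK]; exact hnd0
  rw [PySem.Dict.items_eq_map_keys _ hndF ([] : List String), hK, hkeys0, List.map_map]
  apply List.map_congr_left
  intro k hk
  have hget0 : ((PySem.Dict.ofList a).keys.foldl
      (fun (r : PySem.Dict String (List String)) actor => r.insert actor [])
      PySem.Dict.empty).get? k = some [] := by
    exact PySem.Dict.get?_of_mem_items _
      (by rw [hitems0]; exact List.mem_map_of_mem hk) hnd0
  have hv := hV k [] hget0
  simp only [Function.comp]
  rw [PySem.Dict.getD_of_get?_eq_some _ _ hv]

-- ===== VERDICT (by name: the statement is the Claim_ definition above) =====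
theorem extendedDict_spec : Claim_equal_extendedDict := by
  intro a d _
  show extendedDict a d = extendedDict_alt a d
  rw [A_char, B_char]
  apply List.map_congr_left
  intro k hk
  have hkd := PySem.Dict.nodup_keys_ofList d
  have h1 : ((PySem.Dict.ofList d).keys.foldl
      (fun l m => movL k l ((PySem.Dict.ofList d).getD m [])) ([] : List String)) =
      ((PySem.Dict.ofList d).values.foldl (movL k) []) := by
    rw [← List.foldl_map, ← PySem.Dict.values_eq_map_keys _ hkd ([] : List String)]
  rw [h1, movL_eq_flat, stepL_eq_dedK]
  have h2 : PySem.List.dedup ((PySem.Dict.ofList d).values.foldl (flatStep k) []) =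
      ((PySem.Dict.ofList d).values.foldl (flatStep k) []).foldl PySem.Set.add [] := by
    rw [PySem.List.dedup_eq_ofList, PySem.Set.ofList_eq_foldl]
  rw [h2, filter_dedK k _ [] [] (fun x _ => Iff.rfl)]
  simp
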